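-- pv_equiv track=rewrite | github.com/Viktorikus/Adaptive_Learning | backend/ai_engine/bfs_planner.py | bfs_next_action
-- ===== SOURCE A (Python) =====
-- from collections import deque
--
-- LEARNING_GRAPH = {
--     "review_konsep": ["latihan_dasar"],
--     "latihan_dasar": ["latihan_menengah"],
--     "latihan_menengah": ["latihan_lanjutan"],
--     "latihan_lanjutan": ["evaluasi"],
--     "evaluasi": []
-- }
--
-- def bfs_next_action(start, target):
--     """
--     BFS untuk menentukan langkah belajar berikutnya
--     """
--     queue = deque([[start]])
--     visited = set()
--
--     while queue:
--         path = queue.popleft()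
--         node = path[-1]
--
--         if node == target:
--             # Ambil langkah selanjutnya saja
--             return path[1] if len(path) > 1 else node
--
--         if node not in visited:
--             visited.add(node)
--             for neighbor in LEARNING_GRAPH.get(node, []):
--                 queue.append(path + [neighbor])
--
--     return start
-- ===== SOURCE B (Python) =====
-- LEARNING_GRAPH = {
--     "review_konsep": ["latihan_dasar"],
--     "latihan_dasar": ["latihan_menengah"],
--     "latihan_menengah": ["latihan_lanjutan"],
--     "latihan_lanjutan": ["evaluasi"],
--     "evaluasi": []
-- }
--
--
-- def find_path(node, target, visited):
--     """Recursive DFS: list of nodes from node to target, or None."""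
--     if node == target:
--         return [node]
--     for neighbor in LEARNING_GRAPH.get(node, []):
--         if neighbor not in visited:
--             sub = find_path(neighbor, target, visited | {node})
--             if sub is not None:
--                 return [node] + sub
--     return None
--
--
-- def bfs_next_action(start, target):
--     """
--     BFS untuk menentukan langkah belajar berikutnya
--     """
--     path = find_path(start, target, set())
--     if path is None:
--         return start
--     return path[1] if len(path) > 1 else path[0]
-- ===== Notes on version B (the rewrite author's own statement) =====
-- stated objective: alternative
-- what changed: Replaced the iterative BFS over a queue of paths with a recursive DFS helper find_path that returns the path on first success; equal because the fixed LEARNING_GRAPH is a non-branching chain.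
import Mathlib
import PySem

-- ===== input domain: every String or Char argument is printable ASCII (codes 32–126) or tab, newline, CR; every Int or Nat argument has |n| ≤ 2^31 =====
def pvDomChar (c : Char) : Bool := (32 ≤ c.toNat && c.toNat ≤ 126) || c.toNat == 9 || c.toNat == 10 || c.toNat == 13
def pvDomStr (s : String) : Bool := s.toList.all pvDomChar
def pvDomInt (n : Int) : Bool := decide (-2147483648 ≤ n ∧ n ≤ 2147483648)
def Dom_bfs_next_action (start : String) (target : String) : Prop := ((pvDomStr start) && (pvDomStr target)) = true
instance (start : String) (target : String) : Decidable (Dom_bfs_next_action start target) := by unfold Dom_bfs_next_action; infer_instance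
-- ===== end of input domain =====

-- B replaces A's iterative BFS queue-of-paths with a recursive DFS helper (equal here
-- because the fixed graph is a non-branching chain); objective: alternative decomposition.

-- ===== PORT A =====
def LEARNING_GRAPH : PySem.Dict String (List String) :=
  PySem.Dict.mk
    [("review_konsep", ["latihan_dasar"]),
     ("latihan_dasar", ["latihan_menengah"]),
     ("latihan_menengah", ["latihan_lanjutan"]),
     ("latihan_lanjutan", ["evaluasi"]),
     ("evaluasi", [])]

-- the while-loop of A; fuel is only a totality guard (10 always suffices: the queue holds
-- paths along a 5-node chain, so at most 6 iterations happen); paths are nonempty by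
-- construction, so path[-1]'s getD "" default is never used.
def bfsLoopA : Nat → List (List String) → PySem.Set String → String → String → String
  | 0, _, _, start, _ => start
  | _ + 1, [], _, start, _ => start
  | fuel + 1, path :: queue, visited, start, target =>
    let node := (PySem.List.pyGet? path (-1)).getD ""
    if node = target then
      if 1 < path.length then (PySem.List.pyGet? path 1).getD "" else node
    else if visited.contains node then
      bfsLoopA fuel queue visited start target
    else
      bfsLoopA fuel
        (queue ++ (LEARNING_GRAPH.getD node []).map (fun nb => path ++ [nb]))
        (visited.add node) start target

def bfs_next_action (start : String) (target : String) : String :=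
  bfsLoopA 10 [[start]] PySem.Set.empty start target

-- ===== PORT B =====
-- recursive DFS of Source B; fuel is only a totality guard (the visited set stops revisits
-- in Python; 10 exceeds the chain length).
-- the neighbor for-loop of find_path: first unvisited neighbor on which f succeeds wins
def findLoopF (f : String → PySem.Set String → Option (List String)) :
    List String → String → PySem.Set String → Option (List String)
  | [], _, _ => none
  | nb :: rest, node, visited =>
    if visited.contains nb then findLoopF f rest node visited
    else
      match f nb (visited.add node) with
      | some sub => some (node :: sub)
      | none => findLoopF f rest node visited

def findPath : Nat → String → String → PySem.Set String → Option (List String)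
  | 0, _, _, _ => none
  | fuel + 1, node, target, visited =>
    if node = target then some [node]
    else findLoopF (fun nb v => findPath fuel nb target v)
      (LEARNING_GRAPH.getD node []) node visited

def bfs_next_action_alt (start : String) (target : String) : String :=
  match findPath 10 start target PySem.Set.empty with
  | none => start
  | some path =>
    if 1 < path.length then (PySem.List.pyGet? path 1).getD ""
    else (PySem.List.pyGet? path 0).getD ""

-- ===== PRECONDITION & SPEC =====
def Spec_bfs_next_action (start : String) (target : String) (out : String) : Prop := out = bfs_next_action_alt start target
instance (start : String) (target : String) (out : String) : Decidable (Spec_bfs_next_action start target out) := by unfold Spec_bfs_next_action; infer_instance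

-- ===== CLAIM (what is proved, stated in full; the proofs are below) =====
def Claim_equal_bfs_next_action : Prop := ∀ (start : String) (target : String), Dom_bfs_next_action start target → Spec_bfs_next_action start target (bfs_next_action start target)

-- ===== LEMMAS AND PROOFS =====
set_option maxHeartbeats 2000000 in
theorem bfs_eq (start target : String) :
    bfs_next_action start target = bfs_next_action_alt start target := by
  by_cases h0 : "review_konsep" = start
  · subst h0
    by_cases t0 : "review_konsep" = target
    · subst t0; decide
    by_cases t1 : "latihan_dasar" = target
    · subst t1; decide
    by_cases t2 : "latihan_menengah" = target
    · subst t2; decide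
    by_cases t3 : "latihan_lanjutan" = target
    · subst t3; decide
    by_cases t4 : "evaluasi" = target
    · subst t4; decide
    simp [bfs_next_action, bfs_next_action_alt, bfsLoopA, findPath, findLoopF,
      LEARNING_GRAPH, PySem.Dict.getD_eq_get?_getD, PySem.Dict.get?,
      PySem.Set.empty, PySem.Set.add, PySem.Set.contains, PySem.List.pyGet?,
      PySem.List.pyIdx?, t0, t1, t2, t3, t4]
  by_cases h1 : "latihan_dasar" = start
  · subst h1
    by_cases t0 : "review_konsep" = target
    · subst t0; decide
    by_cases t1 : "latihan_dasar" = target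
    · subst t1; decide
    by_cases t2 : "latihan_menengah" = target
    · subst t2; decide
    by_cases t3 : "latihan_lanjutan" = target
    · subst t3; decide
    by_cases t4 : "evaluasi" = target
    · subst t4; decide
    simp [bfs_next_action, bfs_next_action_alt, bfsLoopA, findPath, findLoopF,
      LEARNING_GRAPH, PySem.Dict.getD_eq_get?_getD, PySem.Dict.get?,
      PySem.Set.empty, PySem.Set.add, PySem.Set.contains, PySem.List.pyGet?,
      PySem.List.pyIdx?, t1, t2, t3, t4]
  by_cases h2 : "latihan_menengah" = start
  · subst h2
    by_cases t0 : "review_konsep" = target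
    · subst t0; decide
    by_cases t1 : "latihan_dasar" = target
    · subst t1; decide
    by_cases t2 : "latihan_menengah" = target
    · subst t2; decide
    by_cases t3 : "latihan_lanjutan" = target
    · subst t3; decide
    by_cases t4 : "evaluasi" = target
    · subst t4; decide
    simp [bfs_next_action, bfs_next_action_alt, bfsLoopA, findPath, findLoopF,
      LEARNING_GRAPH, PySem.Dict.getD_eq_get?_getD, PySem.Dict.get?,
      PySem.Set.empty, PySem.Set.add, PySem.Set.contains, PySem.List.pyGet?,
      PySem.List.pyIdx?, t2, t3, t4]
  by_cases h3 : "latihan_lanjutan" = start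
  · subst h3
    by_cases t0 : "review_konsep" = target
    · subst t0; decide
    by_cases t1 : "latihan_dasar" = target
    · subst t1; decide
    by_cases t2 : "latihan_menengah" = target
    · subst t2; decide
    by_cases t3 : "latihan_lanjutan" = target
    · subst t3; decide
    by_cases t4 : "evaluasi" = target
    · subst t4; decide
    simp [bfs_next_action, bfs_next_action_alt, bfsLoopA, findPath, findLoopF,
      LEARNING_GRAPH, PySem.Dict.getD_eq_get?_getD, PySem.Dict.get?,
      PySem.Set.empty, PySem.Set.add, PySem.Set.contains, PySem.List.pyGet?,
      PySem.List.pyIdx?, t3, t4]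
  by_cases h4 : "evaluasi" = start
  · subst h4
    by_cases t0 : "review_konsep" = target
    · subst t0; decide
    by_cases t1 : "latihan_dasar" = target
    · subst t1; decide
    by_cases t2 : "latihan_menengah" = target
    · subst t2; decide
    by_cases t3 : "latihan_lanjutan" = target
    · subst t3; decide
    by_cases t4 : "evaluasi" = target
    · subst t4; decide
    simp [bfs_next_action, bfs_next_action_alt, bfsLoopA, findPath, findLoopF,
      LEARNING_GRAPH, PySem.Dict.getD_eq_get?_getD, PySem.Dict.get?,
      PySem.Set.empty, PySem.Set.add, PySem.Set.contains, PySem.List.pyGet?,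
      PySem.List.pyIdx?, t4]
  by_cases hst : start = target
  · subst hst
    simp [bfs_next_action, bfs_next_action_alt, bfsLoopA, findPath,
      PySem.List.pyGet?, PySem.List.pyIdx?]
  simp [bfs_next_action, bfs_next_action_alt, bfsLoopA, findPath, findLoopF,
    LEARNING_GRAPH, PySem.Dict.getD_eq_get?_getD, PySem.Dict.get?,
    PySem.Set.empty, PySem.List.pyGet?, PySem.List.pyIdx?, h0, h1, h2, h3, h4, hst]

-- ===== VERDICT (by name: the statement is the Claim_ definition above) =====
theorem bfs_next_action_spec : Claim_equal_bfs_next_action := by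
  intro s t _
  unfold Spec_bfs_next_action
  exact bfs_eq s t
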